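-- pv_equiv track=rewrite | github.com/AshtonVaughan/ProjectTriage | models/knowledge.py | get_attack_patterns_for_tech
-- ===== SOURCE A (Python) =====
-- TECH_ATTACKS: dict[str, list[str]] = {
--     "next.js": [
--         "prototype_pollution", "ssrf", "cache_poisoning",
--         "idor", "jwt_attack", "race_condition",
--     ],
--     "django": [
--         "idor", "ssrf", "race_condition",
--         "jwt_attack", "graphql",
--     ],
--     "rails": [
--         "idor", "ssrf", "race_condition",
--         "desync", "cache_poisoning",
--     ],
--     "graphql": [
--         "graphql", "idor", "race_condition",
--         "ssrf", "jwt_attack",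
--     ],
--     "jwt": [
--         "jwt_attack", "idor", "race_condition",
--         "ssrf",
--     ],
--     "aws": [
--         "ssrf", "idor", "race_condition",
--         "subdomain_takeover",
--     ],
--     "cloudflare": [
--         "cache_poisoning", "desync",
--         "idor", "race_condition",
--     ],
-- }
--
-- def get_attack_patterns_for_tech(tech_stack: dict[str, str]) -> list[str]:
--     """Return prioritized attack pattern names based on detected tech stack."""
--     patterns: list[str] = []
--     seen: set[str] = set()
--
--     for tech_key, tech_value in tech_stack.items():
--         value_lower = tech_value.lower() if tech_value else ""
--         for known_tech, attack_list in TECH_ATTACKS.items():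
--             if known_tech in value_lower or known_tech in tech_key.lower():
--                 for attack in attack_list:
--                     if attack not in seen:
--                         seen.add(attack)
--                         patterns.append(attack)
--
--     # Always include the universal patterns
--     universal = ["idor", "race_condition", "ssrf", "jwt_attack"]
--     for u in universal:
--         if u not in seen:
--             patterns.append(u)
--
--     return patterns
-- ===== SOURCE B (Python) =====
-- TECH_ATTACKS: dict[str, list[str]] = {
--     "next.js": [
--         "prototype_pollution", "ssrf", "cache_poisoning",
--         "idor", "jwt_attack", "race_condition",
--     ],
--     "django": [
--         "idor", "ssrf", "race_condition",
--         "jwt_attack", "graphql",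
--     ],
--     "rails": [
--         "idor", "ssrf", "race_condition",
--         "desync", "cache_poisoning",
--     ],
--     "graphql": [
--         "graphql", "idor", "race_condition",
--         "ssrf", "jwt_attack",
--     ],
--     "jwt": [
--         "jwt_attack", "idor", "race_condition",
--         "ssrf",
--     ],
--     "aws": [
--         "ssrf", "idor", "race_condition",
--         "subdomain_takeover",
--     ],
--     "cloudflare": [
--         "cache_poisoning", "desync",
--         "idor", "race_condition",
--     ],
-- }
--
-- def get_attack_patterns_for_tech(tech_stack: dict[str, str]) -> list[str]:
--     """Return prioritized attack pattern names based on detected tech stack."""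
--     flat: list[str] = []
--     remaining = list(TECH_ATTACKS.items())
--     for tech_key, tech_value in tech_stack.items():
--         value_lower = tech_value.lower() if tech_value else ""
--         key_lower = tech_key.lower()
--         still: list[tuple[str, list[str]]] = []
--         for known_tech, attack_list in remaining:
--             if known_tech in value_lower or known_tech in key_lower:
--                 flat += attack_list
--             else:
--                 still.append((known_tech, attack_list))
--         remaining = still
--     flat += ["idor", "race_condition", "ssrf", "jwt_attack"]
--     return list(dict.fromkeys(flat))
-- ===== Notes on version B (the rewrite author's own statement) =====
-- stated objective: alternative
-- what changed: B maintains a shrinking worklist of still-unmatched table entries instead of A's seen-set of attack names: a matched tech is pruned from the candidate table so its attack list is appended exactly once, and deduplication across lists happens in a single final pass (dict.fromkeys).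
import Mathlib
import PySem

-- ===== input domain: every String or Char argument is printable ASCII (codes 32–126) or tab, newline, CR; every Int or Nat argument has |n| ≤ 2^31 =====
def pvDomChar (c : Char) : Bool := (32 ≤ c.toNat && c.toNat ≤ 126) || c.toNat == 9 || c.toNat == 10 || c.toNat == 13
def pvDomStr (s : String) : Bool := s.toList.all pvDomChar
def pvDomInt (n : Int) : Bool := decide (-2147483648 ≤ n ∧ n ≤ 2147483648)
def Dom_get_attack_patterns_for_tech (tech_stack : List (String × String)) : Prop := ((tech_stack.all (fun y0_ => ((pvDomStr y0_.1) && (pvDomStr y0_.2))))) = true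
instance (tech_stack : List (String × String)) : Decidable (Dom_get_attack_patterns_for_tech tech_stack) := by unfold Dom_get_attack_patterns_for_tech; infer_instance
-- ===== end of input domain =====

-- B replaces A's seen-set bookkeeping by a shrinking worklist: it prunes a matched tech out of the
-- candidate table so its attack list is appended exactly once, and deduplicates once at the end;
-- objective: alternative (different maintained state, same cost).

-- Module constant TECH_ATTACKS (insertion order)
def techAttacks : List (String × List String) :=
  [("next.js", ["prototype_pollution", "ssrf", "cache_poisoning", "idor", "jwt_attack", "race_condition"]),
   ("django", ["idor", "ssrf", "race_condition", "jwt_attack", "graphql"]),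
   ("rails", ["idor", "ssrf", "race_condition", "desync", "cache_poisoning"]),
   ("graphql", ["graphql", "idor", "race_condition", "ssrf", "jwt_attack"]),
   ("jwt", ["jwt_attack", "idor", "race_condition", "ssrf"]),
   ("aws", ["ssrf", "idor", "race_condition", "subdomain_takeover"]),
   ("cloudflare", ["cache_poisoning", "desync", "idor", "race_condition"])]

-- ===== PORT A =====
def get_attack_patterns_for_tech (tech_stack : List (String × String)) : List String :=
  let st : List String × PySem.Set String :=
    tech_stack.foldl (fun st kv =>
      let value_lower := if kv.2 ≠ "" then PySem.Str.lower kv.2 else ""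
      techAttacks.foldl (fun st ka =>
        if PySem.Str.isIn ka.1 value_lower || PySem.Str.isIn ka.1 (PySem.Str.lower kv.1) then
          ka.2.foldl (fun st a =>
            if !(PySem.Set.contains st.2 a) then (st.1 ++ [a], PySem.Set.add st.2 a) else st) st
        else st) st) ([], PySem.Set.empty)
  let universal : List String := ["idor", "race_condition", "ssrf", "jwt_attack"]
  universal.foldl (fun p u => if !(PySem.Set.contains st.2 u) then p ++ [u] else p) st.1

-- ===== PORT B =====
def get_attack_patterns_for_tech_alt (tech_stack : List (String × String)) : List String :=
  let st : List String × List (String × List String) :=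
    tech_stack.foldl (fun st kv =>
      let value_lower := if kv.2 ≠ "" then PySem.Str.lower kv.2 else ""
      let key_lower := PySem.Str.lower kv.1
      st.2.foldl (fun p ka =>
        if PySem.Str.isIn ka.1 value_lower || PySem.Str.isIn ka.1 key_lower then
          (p.1 ++ ka.2, p.2)
        else (p.1, p.2 ++ [ka])) (st.1, ([] : List (String × List String))))
      ([], techAttacks)
  PySem.List.dedup (st.1 ++ ["idor", "race_condition", "ssrf", "jwt_attack"])

-- ===== PRECONDITION & SPEC =====
def Spec_get_attack_patterns_for_tech (tech_stack : List (String × String)) (out : List String) : Prop := out = get_attack_patterns_for_tech_alt tech_stack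
instance (tech_stack : List (String × String)) (out : List String) : Decidable (Spec_get_attack_patterns_for_tech tech_stack out) := by unfold Spec_get_attack_patterns_for_tech; infer_instance

-- ===== CLAIM (what is proved, stated in full; the proofs are below) =====
def Claim_equal_get_attack_patterns_for_tech : Prop := ∀ (tech_stack : List (String × String)), Dom_get_attack_patterns_for_tech tech_stack → Spec_get_attack_patterns_for_tech tech_stack (get_attack_patterns_for_tech tech_stack)

-- ===== LEMMAS AND PROOFS =====

-- the match test both programs apply to a stack item kv and a table entry ka
def pvC (kv : String × String) (ka : String × List String) : Bool :=
  PySem.Str.isIn ka.1 (if kv.2 ≠ "" then PySem.Str.lower kv.2 else "") ||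
    PySem.Str.isIn ka.1 (PySem.Str.lower kv.1)

-- A's innermost loop (guarded appends) run on a state whose two components coincide.
theorem innerA (al : List String) (q : PySem.Set String) :
    al.foldl (fun st a =>
      if !(PySem.Set.contains st.2 a) then (st.1 ++ [a], PySem.Set.add st.2 a) else st)
      (q, q)
    = (PySem.Set.update q al, PySem.Set.update q al) := by
  induction al generalizing q with
  | nil => rfl
  | cons a al ih =>
    by_cases h : a ∈ q
    · simpa [List.foldl_cons, PySem.Set.update_cons, h,
        PySem.Set.add_of_mem h] using ih q
    · simpa [List.foldl_cons, PySem.Set.update_cons, h,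
        PySem.Set.add_of_not_mem h] using ih (PySem.Set.add q a)

-- A's middle loop over TECH_ATTACKS, for an arbitrary match test C, versus the
-- unconditional-extend flat loop.
theorem midA (entries : List (String × List String)) (C : String × List String → Bool)
    (flat : List String) :
    entries.foldl (fun st ka =>
      if C ka then
        ka.2.foldl (fun st a =>
          if !(PySem.Set.contains st.2 a) then (st.1 ++ [a], PySem.Set.add st.2 a) else st) st
      else st) (PySem.Set.ofList flat, PySem.Set.ofList flat)
    = (PySem.Set.ofList (entries.foldl (fun acc ka => if C ka then acc ++ ka.2 else acc) flat),
       PySem.Set.ofList (entries.foldl (fun acc ka => if C ka then acc ++ ka.2 else acc) flat)) := by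
  induction entries generalizing flat with
  | nil => rfl
  | cons ka entries ih =>
    by_cases h : C ka = true
    · simp only [List.foldl_cons, h, if_pos, innerA, ← PySem.Set.ofList_append]
      exact ih (flat ++ ka.2)
    · simp only [List.foldl_cons, Bool.not_eq_true] at *
      simp only [h, Bool.false_eq_true, if_false]
      exact ih flat

-- A's whole outer loop versus the flat-building loop (pvC form).
theorem outerA (ts : List (String × String)) (flat : List String) :
    ts.foldl (fun st kv =>
      techAttacks.foldl (fun st ka =>
        if pvC kv ka then
          ka.2.foldl (fun st a =>
            if !(PySem.Set.contains st.2 a) then (st.1 ++ [a], PySem.Set.add st.2 a) else st) st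
        else st) st) (PySem.Set.ofList flat, PySem.Set.ofList flat)
    = (PySem.Set.ofList (ts.foldl (fun acc kv =>
        techAttacks.foldl (fun acc ka => if pvC kv ka then acc ++ ka.2 else acc) acc) flat),
       PySem.Set.ofList (ts.foldl (fun acc kv =>
        techAttacks.foldl (fun acc ka => if pvC kv ka then acc ++ ka.2 else acc) acc) flat)) := by
  induction ts generalizing flat with
  | nil => rfl
  | cons kv ts ih =>
    simp only [List.foldl_cons]
    rw [midA]
    exact ih _

-- A's universal loop over the four (pairwise distinct) universal patterns, with the
-- seen-set frozen at q, equals q.update(universal).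
theorem universalA (q : PySem.Set String) :
    (["idor", "race_condition", "ssrf", "jwt_attack"] : List String).foldl
      (fun p u => if !(PySem.Set.contains q u) then p ++ [u] else p) q
    = PySem.Set.update q ["idor", "race_condition", "ssrf", "jwt_attack"] := by
  simp only [List.foldl_cons, List.foldl_nil, PySem.Set.update_cons, PySem.Set.update_nil,
    PySem.Set.add_eq_ite, PySem.Set.contains_eq_listContains, List.contains_eq_mem]
  by_cases h1 : ("idor" : String) ∈ q <;>
    by_cases h2 : ("race_condition" : String) ∈ q <;>
      by_cases h3 : ("ssrf" : String) ∈ q <;>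
        by_cases h4 : ("jwt_attack" : String) ∈ q <;>
          simp [h1, h2, h3, h4]

-- updating a set with elements it already contains is the identity
theorem update_of_subset (q : PySem.Set String) (b : List String)
    (h : ∀ a ∈ b, a ∈ q) : PySem.Set.update q b = q := by
  induction b generalizing q with
  | nil => exact PySem.Set.update_nil q
  | cons a b ih =>
    rw [PySem.Set.update_cons, PySem.Set.add_of_mem (h a (by simp))]
    exact ih q (fun x hx => h x (by simp [hx]))

-- A's inner guarded-extend loop in flatMap form
theorem flatIf {α : Type} (C : α → Bool) (g : α → List String) :
    ∀ (l : List α) (acc : List String),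
      l.foldl (fun acc x => if C x then acc ++ g x else acc) acc
        = acc ++ l.flatMap (fun x => if C x then g x else []) := by
  intro l
  induction l with
  | nil => simp
  | cons x l ih =>
    intro acc
    by_cases h : C x = true <;> simp [h, ih, List.append_assoc]

-- B's inner loop: flat grows by the matched blocks, the survivors are the non-matching entries
theorem innerB (C : String × List String → Bool) :
    ∀ (rem : List (String × List String)) (fl : List String) (keep : List (String × List String)),
      rem.foldl (fun p ka => if C ka then (p.1 ++ ka.2, p.2) else (p.1, p.2 ++ [ka])) (fl, keep)
      = (fl ++ rem.flatMap (fun ka => if C ka then ka.2 else []),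
         keep ++ rem.filter (fun ka => !C ka)) := by
  intro rem
  induction rem with
  | nil => simp
  | cons ka rem ih =>
    intro fl keep
    by_cases h : C ka = true <;> simp [h, ih, List.append_assoc]

-- dropping blocks whose elements are already in the set does not change the update:
-- l' is a sublist of the duplicate-free l, and every skipped entry's block is inside q
theorem absorb (g : String × List String → List String) :
    ∀ {l' l : List (String × List String)}, l'.Sublist l → l.Nodup →
      ∀ (q : PySem.Set String), (∀ x ∈ l, x ∉ l' → ∀ a ∈ g x, a ∈ q) →
      PySem.Set.update q (l.flatMap g) = PySem.Set.update q (l'.flatMap g) := by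
  intro l' l h
  induction h with
  | slnil => intro _ q _; rfl
  | @cons l' l x h ih =>
    intro hnd q hq
    have hxl' : x ∉ l' := fun hx => (List.nodup_cons.mp hnd).1 (h.subset hx)
    have hgx : PySem.Set.update q (g x) = q :=
      update_of_subset q (g x) (hq x (by simp) hxl')
    rw [List.flatMap_cons, PySem.Set.update_append, hgx]
    exact ih (List.nodup_cons.mp hnd).2 q
      (fun y hy hy' => hq y (by simp [hy]) hy')
  | @cons₂ l' l x h ih =>
    intro hnd q hq
    rw [List.flatMap_cons, List.flatMap_cons, PySem.Set.update_append, PySem.Set.update_append]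
    apply ih (List.nodup_cons.mp hnd).2
    intro y hy hy' a ha
    rcases eq_or_ne y x with rfl | hne
    · exact (PySem.Set.mem_update q (g y) a).mpr (Or.inr ha)
    · have : y ∉ x :: l' := by simp [hne, hy']
      exact (PySem.Set.mem_update q (g x) a).mpr
        (Or.inl (hq y (by simp [hy]) this a ha))

-- the table entries are pairwise distinct
theorem techAttacks_nodup : techAttacks.Nodup := by decide

-- the loop invariant: A scans the whole table with a seen-set, B scans the pruned
-- worklist rem; as long as every pruned entry's attacks are already collected,
-- the two flat lists stay equal as sets.
theorem mainLoop :
    ∀ (ts : List (String × String)) (rem : List (String × List String)) (fA fB : List String),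
      rem.Sublist techAttacks →
      (∀ ka ∈ techAttacks, ka ∉ rem → ∀ a ∈ ka.2, a ∈ PySem.Set.ofList fB) →
      PySem.Set.ofList fA = PySem.Set.ofList fB →
      PySem.Set.ofList (ts.foldl (fun acc kv =>
          techAttacks.foldl (fun acc ka => if pvC kv ka then acc ++ ka.2 else acc) acc) fA)
      = PySem.Set.ofList ((ts.foldl (fun st kv =>
          st.2.foldl (fun p ka => if pvC kv ka then (p.1 ++ ka.2, p.2) else (p.1, p.2 ++ [ka]))
            (st.1, ([] : List (String × List String)))) (fB, rem)).1) := by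
  intro ts
  induction ts with
  | nil => intro rem fA fB _ _ h; exact h
  | cons kv ts ih =>
    intro rem fA fB hsub hinv hset
    simp only [List.foldl_cons]
    rw [flatIf (pvC kv) (fun ka => ka.2) techAttacks fA, innerB (pvC kv) rem fB []]
    simp only [List.nil_append]
    refine ih _ _ _ ((List.filter_sublist).trans hsub) ?_ ?_
    · -- invariant is preserved
      intro ka hka hka' a ha
      rw [PySem.Set.ofList_append, PySem.Set.mem_update]
      by_cases hr : ka ∈ rem
      · -- ka was in the worklist and matched now: its block was just appended
        have hc : pvC kv ka = true := by
          by_contra hc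
          exact hka' (List.mem_filter.mpr ⟨hr, by simp [hc]⟩)
        right
        exact List.mem_flatMap.mpr ⟨ka, hr, by simp [hc, ha]⟩
      · -- ka was pruned earlier: its block is already in the set
        left
        exact hinv ka hka hr a ha
    · -- the two extended flat lists are equal as sets
      rw [PySem.Set.ofList_append, PySem.Set.ofList_append, hset]
      exact absorb (fun ka => if pvC kv ka then ka.2 else []) hsub techAttacks_nodup
        (PySem.Set.ofList fB)
        (fun x hx hx' a ha => by
          by_cases hc : pvC kv x = true
          · simp only [hc, if_true] at ha
            exact hinv x hx hx' a ha
          · simp [hc] at ha)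

-- ===== VERDICT (by name: the statement is the Claim_ definition above) =====
theorem get_attack_patterns_for_tech_spec : Claim_equal_get_attack_patterns_for_tech := by
  unfold Claim_equal_get_attack_patterns_for_tech
  intro ts _
  unfold Spec_get_attack_patterns_for_tech
  show (let st : List String × PySem.Set String :=
    ts.foldl (fun st kv =>
      techAttacks.foldl (fun st ka =>
        if pvC kv ka then
          ka.2.foldl (fun st a =>
            if !(PySem.Set.contains st.2 a) then (st.1 ++ [a], PySem.Set.add st.2 a) else st) st
        else st) st) (PySem.Set.ofList [], PySem.Set.ofList [])
    (["idor", "race_condition", "ssrf", "jwt_attack"] : List String).foldl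
      (fun p u => if !(PySem.Set.contains st.2 u) then p ++ [u] else p) st.1)
    = (let st : List String × List (String × List String) :=
        ts.foldl (fun st kv =>
          st.2.foldl (fun p ka => if pvC kv ka then (p.1 ++ ka.2, p.2) else (p.1, p.2 ++ [ka]))
            (st.1, ([] : List (String × List String)))) ([], techAttacks)
       PySem.List.dedup (st.1 ++ ["idor", "race_condition", "ssrf", "jwt_attack"]))
  simp only [outerA]
  rw [universalA, PySem.List.dedup_eq_ofList, PySem.Set.ofList_append]
  rw [mainLoop ts techAttacks [] [] (List.Sublist.refl _) (fun ka h h' => absurd h h') rfl]
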